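-- pv_equiv track=rewrite | github.com/pypi-data/pypi-mirror-397 | packages/dihlibs/dihlibs-0.0.93-py3-none-any.whl/dihlibs/evaluator.py | _handle_parenthesis
-- ===== SOURCE A (Python) =====
-- def _handle_parenthesis(output, operators, parenthesis):
--     if parenthesis == "(":
--         operators.append(parenthesis)
--     elif parenthesis == ")":
--         while operators and operators[-1] != "(":
--             output += operators.pop() + " "
--         if operators and operators[-1] == "(":
--             operators.pop()
--     return output
-- ===== SOURCE B (Python) =====
-- def _handle_parenthesis(output, operators, parenthesis):
--     if parenthesis == "(":
--         operators.append(parenthesis)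
--     elif parenthesis == ")":
--         try:
--             idx = len(operators) - 1 - operators[::-1].index("(")
--         except ValueError:
--             idx = -1
--         output += "".join(op + " " for op in reversed(operators[idx + 1:]))
--         if idx >= 0:
--             del operators[idx:]
--         else:
--             del operators[:]
--     return output
-- ===== Notes on version B (the rewrite author's own statement) =====
-- stated objective: alternative
-- what changed: Replaces A's one-at-a-time while-loop of stack pops with a single reverse index search for the matching '(' followed by a batched slice emit (joined in reversed order) and a single tail deletion.
import Mathlib
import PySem

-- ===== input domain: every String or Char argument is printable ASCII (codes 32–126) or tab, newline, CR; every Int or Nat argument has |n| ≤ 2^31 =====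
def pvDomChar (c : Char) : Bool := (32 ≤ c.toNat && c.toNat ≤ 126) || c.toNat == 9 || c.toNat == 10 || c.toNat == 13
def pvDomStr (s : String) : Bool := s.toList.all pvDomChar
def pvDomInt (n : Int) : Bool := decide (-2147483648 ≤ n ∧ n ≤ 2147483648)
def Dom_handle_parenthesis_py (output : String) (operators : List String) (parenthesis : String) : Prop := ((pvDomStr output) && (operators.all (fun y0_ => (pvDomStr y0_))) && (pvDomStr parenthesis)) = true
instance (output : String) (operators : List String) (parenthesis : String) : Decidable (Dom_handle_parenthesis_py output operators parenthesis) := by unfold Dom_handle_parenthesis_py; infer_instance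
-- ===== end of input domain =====

-- B replaces A's one-at-a-time pop loop by locating the matching "(" with a single
-- reverse index search and emitting the whole operator tail in one batch (objective:
-- alternative decomposition, same cost). Both programs also mutate `operators` in
-- place identically in Python; the equivalence proved here is about the RETURN value.

-- ===== PORT A =====
-- A's while loop pops from the END of `operators`; we transliterate it as a
-- recursion over the reversed list (head of the reversed list = Python's operators[-1]).
def pvALoop (out : String) (revOps : List String) : String :=
  match revOps with
  | [] => out
  | x :: rest => if x ≠ "(" then pvALoop (out ++ x ++ " ") rest else out

def handle_parenthesis_py (output : String) (operators : List String) (parenthesis : String) : String :=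
  if parenthesis = "(" then
    output                      -- operators.append mutates only the list; return value is output
  else if parenthesis = ")" then
    pvALoop output operators.reverse   -- the trailing pop of "(" does not change output
  else
    output

-- ===== PORT B =====
def handle_parenthesis_py_alt (output : String) (operators : List String) (parenthesis : String) : String :=
  if parenthesis = "(" then
    output
  else if parenthesis = ")" then
    -- idx = len(operators) - 1 - operators[::-1].index("(")  (or -1 on ValueError)
    let idx : Int :=
      match PySem.List.index? operators.reverse "(" with
      | some i => (operators.length : Int) - 1 - (i : Int)
      | none => -1
    -- output += "".join(op + " " for op in reversed(operators[idx+1:]))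
    output ++ String.join ((PySem.List.slice operators (some (idx + 1)) none).reverse.map (fun op => op ++ " "))
  else
    output

-- ===== PRECONDITION & SPEC =====
def Spec_handle_parenthesis_py (output : String) (operators : List String) (parenthesis : String) (out : String) : Prop := out = handle_parenthesis_py_alt output operators parenthesis
instance (output : String) (operators : List String) (parenthesis : String) (out : String) : Decidable (Spec_handle_parenthesis_py output operators parenthesis out) := by unfold Spec_handle_parenthesis_py; infer_instance

-- ===== CLAIM (what is proved, stated in full; the proofs are below) =====
def Claim_equal_handle_parenthesis_py : Prop := ∀ (output : String) (operators : List String) (parenthesis : String), Dom_handle_parenthesis_py output operators parenthesis → Spec_handle_parenthesis_py output operators parenthesis (handle_parenthesis_py output operators parenthesis)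

-- ===== LEMMAS AND PROOFS =====

-- A's loop consumes exactly the maximal "("-free prefix of the reversed stack.
theorem pvALoop_eq_takeWhile (revOps : List String) (out : String) :
    pvALoop out revOps
      = (revOps.takeWhile (fun x => x ≠ "(")).foldl (fun acc x => acc ++ x ++ " ") out := by
  induction revOps generalizing out with
  | nil => simp [pvALoop]
  | cons x rest ih =>
    by_cases h : x = "("
    · simp [pvALoop, h, List.takeWhile]
    · simp [pvALoop, h, List.takeWhile, ih]

theorem pv_foldl_join (l : List String) (a : String) :
    l.foldl (fun r s => r ++ s) a = a ++ l.foldl (fun r s => r ++ s) "" := by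
  induction l generalizing a with
  | nil => simp
  | cons y t ih =>
    simp only [List.foldl_cons]
    rw [ih (a ++ y), ih ("" ++ y)]
    simp [String.append_assoc]

theorem pv_join_cons (x : String) (l : List String) :
    String.join (x :: l) = x ++ String.join l := by
  simp only [String.join, List.foldl_cons]
  rw [pv_foldl_join l ("" ++ x)]
  simp

theorem pv_foldl_append (l : List String) (out : String) :
    l.foldl (fun acc x => acc ++ x ++ " ") out
      = out ++ String.join (l.map (fun op => op ++ " ")) := by
  induction l generalizing out with
  | nil => simp [String.join]
  | cons x rest ih =>
    simp only [List.foldl_cons, List.map_cons, ih, pv_join_cons]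
    simp [String.append_assoc]

-- The reversed slice operators[idx+1:] is exactly the "("-free prefix of operators.reverse.
theorem pv_takeWhile_marker (pre suf : List String) (h : "(" ∉ pre) :
    (pre ++ "(" :: suf).takeWhile (fun x => x ≠ "(") = pre := by
  induction pre with
  | nil => simp
  | cons y t ih =>
    simp only [List.mem_cons, not_or] at h
    have hy : y ≠ "(" := fun e => h.1 e.symm
    simp only [List.cons_append, List.takeWhile_cons]
    rw [if_pos (by simpa using hy)]
    exact congrArg _ (ih h.2)

theorem pv_slice_eq_takeWhile (operators : List String) :
    (PySem.List.slice operators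
        (some ((match PySem.List.index? operators.reverse "(" with
                | some i => ((operators.length : Int) - 1 - (i : Int))
                | none => -1) + 1)) none).reverse
      = operators.reverse.takeWhile (fun x => x ≠ "(") := by
  rcases hidx : PySem.List.index? operators.reverse "(" with _ | i
  · have hnm : "(" ∉ operators.reverse := (PySem.List.index?_eq_none_iff _ _).1 hidx
    norm_num
    exact ((List.takeWhile_eq_self_iff).2 (fun x hx => by simp; rintro rfl; exact hnm hx)).symm
  · obtain ⟨pre, suf, hr, hlen, hpre⟩ := (PySem.List.index?_eq_some_iff _ _ _).1 hidx
    have hops : operators = (suf.reverse ++ ["("]) ++ pre.reverse := by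
      have := congrArg List.reverse hr
      simpa using this
    have hlenops : operators.length = pre.length + 1 + suf.length := by
      have := congrArg List.length hr
      simp at this; omega
    have harg : ((operators.length : Int) - 1 - (i : Int) + 1) = ((suf.length + 1 : Nat) : Int) := by
      push_cast; omega
    rw [harg, PySem.List.slice_from_natCast]
    rw [hr, pv_takeWhile_marker pre suf hpre]
    rw [hops]
    rw [show suf.length + 1 = (suf.reverse ++ ["("]).length from by simp]
    rw [List.drop_left, List.reverse_reverse]

theorem handle_parenthesis_py_spec : Claim_equal_handle_parenthesis_py := by
  intro output operators parenthesis _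
  unfold Spec_handle_parenthesis_py handle_parenthesis_py handle_parenthesis_py_alt
  by_cases h1 : parenthesis = "("
  · simp only [if_pos h1]
  · by_cases h2 : parenthesis = ")"
    · simp only [if_neg h1, if_pos h2]
      rw [pvALoop_eq_takeWhile, pv_foldl_append, pv_slice_eq_takeWhile]
    · simp only [if_neg h1, if_neg h2]
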